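-- pv_equiv track=rewrite | github.com/SarangDeshmukh7/Learn-Python | Games/Exercise_09.py | createPlayingHand
-- ===== SOURCE A (Python) =====
-- def pointCount(myCards):
--     myCount = 0
--     aceCount = 0
--
--     for i in myCards:
--         if i[1] == 'J' or i[1] == 'Q' or i[1] == 'K' or i[1] == 'T':
--             myCount += 10
--         elif i[1] != 'A':
--             myCount += int(i[1])
--         else:
--             aceCount += 1
--
--         if aceCount == 1 and myCount <= 10:
--             myCount += 11
--         elif aceCount != 0:
--             myCount += 1
--
--     return myCount
--
-- def createPlayingHand(myDeck):
--     dealerHand = []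
--     playerHand = []
--
--     dealerHand.append(myDeck.pop())
--     dealerHand.append(myDeck.pop())
--     playerHand.append(myDeck.pop())
--     playerHand.append(myDeck.pop())
--
--     while pointCount(dealerHand) <= 16:
--         dealerHand.append(myDeck.pop())
--
--     return [dealerHand, playerHand]
-- ===== SOURCE B (Python) =====
-- def createPlayingHand(myDeck):
--     # Like the original, consumes cards from the end of myDeck (here via del).
--     def step(state, card):
--         count, aces = state
--         r = card[1]
--         if r in ('J', 'Q', 'K', 'T'):
--             count += 10
--         elif r != 'A':
--             count += int(r)
--         else:
--             aces += 1
--         if aces == 1 and count <= 10: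
--             count += 11
--         elif aces != 0:
--             count += 1
--         return (count, aces)
--
--     rev = myDeck[::-1]
--     dealer_seq = rev[:2] + rev[4:]   # cards the dealer can ever receive, in draw order
--     st = (0, 0)
--     k = 0
--     while k < 2 or st[0] <= 16:
--         st = step(st, dealer_seq[k])
--         k += 1
--     dealerHand = dealer_seq[:k]
--     playerHand = rev[2:4]
--     del myDeck[len(myDeck) - (k + 2):]
--     return [dealerHand, playerHand]
-- ===== Notes on version B (the rewrite author's own statement) =====
-- stated objective: alternative
-- what changed: B reverses and slices the deck up front into the dealer's card sequence and the player's two cards, then makes one forward scan with a running (count, aces) state to find the dealer's stopping index and slices the hands out, instead of A's pop-driven while loop that rescans the whole dealer hand with pointCount before every draw.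
import Mathlib
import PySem

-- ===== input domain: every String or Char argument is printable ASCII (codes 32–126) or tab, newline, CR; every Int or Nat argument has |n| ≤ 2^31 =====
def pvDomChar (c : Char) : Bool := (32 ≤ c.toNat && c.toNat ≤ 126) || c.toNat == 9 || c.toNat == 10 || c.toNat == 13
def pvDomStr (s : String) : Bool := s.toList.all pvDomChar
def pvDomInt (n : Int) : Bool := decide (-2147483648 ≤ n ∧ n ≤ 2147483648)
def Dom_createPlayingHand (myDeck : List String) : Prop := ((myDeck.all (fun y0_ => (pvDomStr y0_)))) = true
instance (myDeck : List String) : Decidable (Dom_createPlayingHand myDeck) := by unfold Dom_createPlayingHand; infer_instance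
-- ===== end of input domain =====

-- B reverses/slices the deck up front and scans the dealer's card sequence once with a
-- running (count, aces) state to find the stopping index, then slices both hands out,
-- instead of A's pop-driven loop that rescans the whole dealer hand before every draw
-- (objective: alternative). Both Pythons consume the dealt cards from the end of myDeck
-- in place; the equivalence proved here is about the return value.

-- Per-card update: exactly the body of the per-card logic (identical lines in both Pythons);
-- none exactly where Python raises (IndexError on a short card, ValueError on int of a non-digit).
def cardStep? (st : Int × Int) (i : String) : Option (Int × Int) :=
  match PySem.Str.pyGet? i 1 with
  | none => none
  | some c =>
    let upd : Option (Int × Int) :=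
      if c = 'J' ∨ c = 'Q' ∨ c = 'K' ∨ c = 'T' then some (st.1 + 10, st.2)
      else if c ≠ 'A' then (PySem.Int.ofChars? [c]).map (fun v => (st.1 + v, st.2))
      else some (st.1, st.2 + 1)
    match upd with
    | none => none
    | some (myCount, aceCount) =>
      if aceCount = 1 ∧ myCount ≤ 10 then some (myCount + 11, aceCount)
      else if aceCount ≠ 0 then some (myCount + 1, aceCount)
      else some (myCount, aceCount)

-- ===== PORT A =====
-- A's pointCount: rescan the whole hand from (0, 0) each time it is called.
def pointCountGo (myCards : List String) (st : Int × Int) : Option Int :=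
  match myCards with
  | [] => some st.1
  | i :: rest =>
    match cardStep? st i with
    | none => none
    | some st' => pointCountGo rest st'

def pointCount (myCards : List String) : Option Int := pointCountGo myCards (0, 0)

-- A's while loop: recompute pointCount of the whole dealer hand before every draw.
def dealLoopA (dealerHand : List String) (deck : List String) : Option (List String) :=
  match pointCount dealerHand with
  | none => none
  | some n =>
    if n ≤ 16 then
      match h : PySem.List.pop? deck with
      | none => none
      | some (c, deck') =>
        have h2 : deck'.length + 1 = deck.length := PySem.List.length_of_pop?_eq_some deck h
        have : deck'.length < deck.length := by omega
        dealLoopA (dealerHand ++ [c]) deck'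
    else some dealerHand
termination_by deck.length

def createPlayingHand (myDeck : List String) : List (List String) :=
  match PySem.List.pop? myDeck with
  | none => []          -- IndexError (outside Pre_)
  | some (d1, deck1) =>
    match PySem.List.pop? deck1 with
    | none => []
    | some (d2, deck2) =>
      match PySem.List.pop? deck2 with
      | none => []
      | some (p1, deck3) =>
        match PySem.List.pop? deck3 with
        | none => []
        | some (p2, deck4) =>
          match dealLoopA [d1, d2] deck4 with
          | none => []  -- ValueError/IndexError inside the loop (outside Pre_)
          | some dealerHand => [dealerHand, [p1, p2]]

-- ===== PORT B =====
-- B's while loop over the precomputed dealer sequence: find the stopping index k,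
-- carrying the running state; never rescans a hand, never pops.
def stopIndex? (cards : List String) (st : Int × Int) (k : Nat) : Option Nat :=
  if k < 2 ∨ st.1 ≤ 16 then
    match h : cards[k]? with
    | none => none        -- IndexError (outside Pre_)
    | some c =>
      match cardStep? st c with
      | none => none      -- ValueError/IndexError on a bad card (outside Pre_)
      | some st' =>
        have : k < cards.length := (List.getElem?_eq_some_iff.mp h).1
        stopIndex? cards st' (k + 1)
  else some k
termination_by cards.length - k

def createPlayingHand_alt (myDeck : List String) : List (List String) :=
  let rev := myDeck.reverse
  let dealerSeq := rev.take 2 ++ rev.drop 4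
  match stopIndex? dealerSeq (0, 0) 0 with
  | none => []
  | some k => [dealerSeq.take k, (rev.drop 2).take 2]

-- ===== PRECONDITION & SPEC =====
-- Rank validity and point value of a card's second character (pure data conditions).
def pvRankOk (i : String) : Bool :=
  match i.toList[1]? with
  | some c => c.isDigit || c ∈ ['T', 'J', 'Q', 'K', 'A']
  | none => false

def pvStep (st : Int × Int) (c : Char) : Int × Int :=
  let s2 : Int × Int :=
    if c = 'A' then (st.1, st.2 + 1)
    else if c ∈ ['T', 'J', 'Q', 'K'] then (st.1 + 10, st.2)
    else (st.1 + ((c.toNat : Int) - 48), st.2)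
  if s2.2 = 1 ∧ s2.1 ≤ 10 then (s2.1 + 11, s2.2)
  else if s2.2 ≠ 0 then (s2.1 + 1, s2.2) else s2

-- Blackjack value of a hand under A's rule (a prefix sum over the cards' second characters).
def pvCount (cards : List String) : Int :=
  (cards.foldl (fun st i => pvStep st (i.toList.getD 1 ' ')) (0, 0)).1

-- The sequence of cards the dealer receives: the top two of the deck, then (after the
-- player's two) the rest of the deck, all taken from the end.
def pvDealerSeq (myDeck : List String) : List String :=
  (myDeck.reverse.take 2) ++ (myDeck.reverse.drop 4)

-- Pre_ = exactly the inputs on which the Python A returns: at least four cards, and the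
-- dealer stops at some index k of his card sequence — all k cards up to there have a valid
-- rank character, the point prefix sum first exceeds 16 there, and it stays ≤ 16 before
-- (on every other input A raises IndexError or ValueError). The stopping point is
-- inherently a property of the cards' point values, so Pre_ is stated via a prefix sum
-- over the input data; it does not simulate the deal itself.
def Pre_createPlayingHand (myDeck : List String) : Prop :=
  4 ≤ myDeck.length ∧
  ∃ k ≤ (pvDealerSeq myDeck).length,
    2 ≤ k ∧ (∀ i ∈ (pvDealerSeq myDeck).take k, pvRankOk i = true) ∧
    16 < pvCount ((pvDealerSeq myDeck).take k) ∧
    ∀ j < k, 2 ≤ j → pvCount ((pvDealerSeq myDeck).take j) ≤ 16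

instance (myDeck : List String) : Decidable (Pre_createPlayingHand myDeck) := by
  unfold Pre_createPlayingHand; infer_instance

def pvWitness_createPlayingHand : List String := ["SA", "H9", "H5", "CT", "SK"]

def Spec_createPlayingHand (myDeck : List String) (out : List (List String)) : Prop := out = createPlayingHand_alt myDeck
instance (myDeck : List String) (out : List (List String)) : Decidable (Spec_createPlayingHand myDeck out) := by unfold Spec_createPlayingHand; infer_instance

-- ===== CLAIM (what is proved, stated in full; the proofs are below) =====
def Claim_equal_createPlayingHand : Prop := ∀ (myDeck : List String), Dom_createPlayingHand myDeck → Pre_createPlayingHand myDeck → Spec_createPlayingHand myDeck (createPlayingHand myDeck)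

-- ===== LEMMAS AND PROOFS =====

-- Proof helper: folding the per-card update through a hand (the running state of both loops).
def pvFold (cards : List String) (st : Int × Int) : Option (Int × Int) :=
  match cards with
  | [] => some st
  | c :: rest =>
    match cardStep? st c with
    | none => none
    | some st' => pvFold rest st'

-- Equation lemmas for the two loops (their dependent matches are awkward to rewrite directly).
theorem stopIndex?_stop (cards : List String) (st : Int × Int) (k : Nat)
    (hc : ¬ (k < 2 ∨ st.1 ≤ 16)) : stopIndex? cards st k = some k := by
  rw [stopIndex?, if_neg hc]

theorem stopIndex?_oob (cards : List String) (st : Int × Int) (k : Nat)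
    (hc : k < 2 ∨ st.1 ≤ 16) (h : cards[k]? = none) : stopIndex? cards st k = none := by
  rw [stopIndex?, if_pos hc]
  split
  · rfl
  · rename_i c heq
    simp [h] at heq

theorem stopIndex?_bad (cards : List String) (st : Int × Int) (k : Nat) (c : String)
    (hc : k < 2 ∨ st.1 ≤ 16) (h : cards[k]? = some c) (hs : cardStep? st c = none) :
    stopIndex? cards st k = none := by
  rw [stopIndex?, if_pos hc]
  split
  · next heq => simp [h] at heq
  · rename_i c' heq
    rw [h] at heq; injection heq with he; subst he; rw [hs]

theorem stopIndex?_step (cards : List String) (st : Int × Int) (k : Nat) (c : String)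
    (st' : Int × Int) (hc : k < 2 ∨ st.1 ≤ 16) (h : cards[k]? = some c)
    (hs : cardStep? st c = some st') : stopIndex? cards st k = stopIndex? cards st' (k + 1) := by
  rw [stopIndex?, if_pos hc]
  split
  · next heq => simp [h] at heq
  · rename_i c' heq
    rw [h] at heq; injection heq with he; subst he; rw [hs]

theorem dealLoopA_bad (hand deck : List String) (h : pointCount hand = none) :
    dealLoopA hand deck = none := by
  rw [dealLoopA, h]

theorem dealLoopA_stop (hand deck : List String) (n : Int)
    (h : pointCount hand = some n) (h16 : ¬ n ≤ 16) : dealLoopA hand deck = some hand := by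
  rw [dealLoopA, h]; dsimp only; rw [if_neg h16]

theorem dealLoopA_oob (hand deck : List String) (n : Int)
    (h : pointCount hand = some n) (h16 : n ≤ 16) (hp : PySem.List.pop? deck = none) :
    dealLoopA hand deck = none := by
  rw [dealLoopA, h]; dsimp only; rw [if_pos h16]
  split
  · rfl
  · rename_i c deck' heq
    simp [hp] at heq

theorem dealLoopA_pop (hand deck : List String) (n : Int) (c : String) (deck' : List String)
    (h : pointCount hand = some n) (h16 : n ≤ 16)
    (hp : PySem.List.pop? deck = some (c, deck')) :
    dealLoopA hand deck = dealLoopA (hand ++ [c]) deck' := by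
  rw [dealLoopA, h]; dsimp only; rw [if_pos h16]
  split
  · next heq => simp [hp] at heq
  · rename_i c1 d1 heq
    rw [hp] at heq; injection heq with he; cases he; rfl

-- A's rescan of a hand equals the first component of the fold of the running state.
theorem pointCountGo_eq_pvFold (cards : List String) (st : Int × Int) :
    pointCountGo cards st = (pvFold cards st).map Prod.fst := by
  induction cards generalizing st with
  | nil => rfl
  | cons c rest ih =>
    simp only [pointCountGo, pvFold]
    cases cardStep? st c with
    | none => rfl
    | some st' => exact ih st'

theorem pvFold_append_singleton (cards : List String) (c : String) (st : Int × Int) :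
    pvFold (cards ++ [c]) st = (pvFold cards st).bind (fun s => cardStep? s c) := by
  induction cards generalizing st with
  | nil =>
    simp only [List.nil_append, pvFold, Option.bind_some]
    cases cardStep? st c <;> rfl
  | cons x rest ih =>
    simp only [List.cons_append, pvFold]
    cases cardStep? st x with
    | none => rfl
    | some st' => exact ih st'

-- A's pop-driven loop equals B's index scan of hand ++ deck.reverse starting at hand.length,
-- whenever the carried state is the fold of the hand so far.
theorem dealLoopA_eq_stopIndex (n : Nat) : ∀ (deck : List String), deck.length ≤ n →
    ∀ (hand : List String) (st : Int × Int),
    2 ≤ hand.length → pvFold hand (0, 0) = some st →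
    dealLoopA hand deck =
      (stopIndex? (hand ++ deck.reverse) st hand.length).map (hand ++ deck.reverse).take := by
  induction n with
  | zero =>
    intro deck hlen hand st hhand hst
    have hdeck : deck = [] := List.eq_nil_of_length_eq_zero (by omega)
    subst hdeck
    have hpc : pointCount hand = some st.1 := by
      rw [pointCount, pointCountGo_eq_pvFold, hst]; rfl
    by_cases h16 : st.1 ≤ 16
    · rw [dealLoopA_oob hand [] st.1 hpc h16 rfl,
        stopIndex?_oob _ st hand.length (Or.inr h16) (by simp)]
      rfl
    · rw [dealLoopA_stop hand [] st.1 hpc h16,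
        stopIndex?_stop _ st hand.length (by rintro (h | h) <;> omega)]
      simp
  | succ m ih =>
    intro deck hlen hand st hhand hst
    have hpc : pointCount hand = some st.1 := by
      rw [pointCount, pointCountGo_eq_pvFold, hst]; rfl
    by_cases h16 : st.1 ≤ 16
    · rcases deck.eq_nil_or_concat with hnil | ⟨ys, c, hconcat⟩
      · subst hnil
        rw [dealLoopA_oob hand [] st.1 hpc h16 rfl,
          stopIndex?_oob _ st hand.length (Or.inr h16) (by simp)]
        rfl
      · rw [List.concat_eq_append] at hconcat
        subst hconcat
        have hpop : PySem.List.pop? (ys ++ [c]) = some (c, ys) := PySem.List.pop?_last ys c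
        have hget : (hand ++ (ys ++ [c]).reverse)[hand.length]? = some c := by
          rw [List.getElem?_append_right (le_refl _)]
          simp
        rw [dealLoopA_pop hand _ st.1 c ys hpc h16 hpop]
        cases hstep : cardStep? st c with
        | none =>
          -- both sides fail: A's next pointCount hits the same bad card.
          rw [dealLoopA_bad _ ys (by
            rw [pointCount, pointCountGo_eq_pvFold, pvFold_append_singleton, hst,
              Option.bind_some, hstep]; rfl),
            stopIndex?_bad _ st hand.length c (Or.inr h16) hget hstep]
          rfl
        | some st' =>
          rw [stopIndex?_step _ st hand.length c st' (Or.inr h16) hget hstep]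
          have hlen' : ys.length ≤ m := by
            have : (ys ++ [c]).length = ys.length + 1 := by simp
            omega
          have := ih ys hlen' (hand ++ [c]) st' (by simp; omega)
            (by rw [pvFold_append_singleton, hst, Option.bind_some, hstep])
          rw [this]
          have hre : (hand ++ [c]) ++ ys.reverse = hand ++ (ys ++ [c]).reverse := by simp
          have hle : (hand ++ [c]).length = hand.length + 1 := by simp
          rw [hre, hle]
    · rw [dealLoopA_stop hand deck st.1 hpc h16,
        stopIndex?_stop _ st hand.length (by rintro (h | h) <;> omega)]
      simp

-- ===== VERDICT (by name: the statement is the Claim_ definition above) =====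
theorem createPlayingHand_spec : Claim_equal_createPlayingHand := by
  intro myDeck _ hpre
  unfold Spec_createPlayingHand createPlayingHand createPlayingHand_alt
  obtain ⟨hlen, -⟩ := hpre
  have hrlen : 4 ≤ myDeck.reverse.length := by simpa using hlen
  obtain ⟨d1, rev1, hrev⟩ : ∃ d1 rev1, myDeck.reverse = d1 :: rev1 := by
    cases h : myDeck.reverse with
    | nil => rw [h] at hrlen; simp at hrlen
    | cons a l => exact ⟨a, l, rfl⟩
  obtain ⟨d2, rev2, hrev1⟩ : ∃ d2 rev2, rev1 = d2 :: rev2 := by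
    cases h : rev1 with
    | nil => rw [hrev, h] at hrlen; simp at hrlen
    | cons a l => exact ⟨a, l, rfl⟩
  obtain ⟨p1, rev3, hrev2⟩ : ∃ p1 rev3, rev2 = p1 :: rev3 := by
    cases h : rev2 with
    | nil => rw [hrev, hrev1, h] at hrlen; simp at hrlen
    | cons a l => exact ⟨a, l, rfl⟩
  obtain ⟨p2, rest, hrev3⟩ : ∃ p2 rest, rev3 = p2 :: rest := by
    cases h : rev3 with
    | nil => rw [hrev, hrev1, hrev2, h] at hrlen; simp at hrlen
    | cons a l => exact ⟨a, l, rfl⟩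
  have hdeck : myDeck = rest.reverse ++ [p2, p1, d2, d1] := by
    have h4 : myDeck.reverse = d1 :: d2 :: p1 :: p2 :: rest := by
      rw [hrev, hrev1, hrev2, hrev3]
    calc myDeck = myDeck.reverse.reverse := by rw [List.reverse_reverse]
    _ = rest.reverse ++ [p2, p1, d2, d1] := by rw [h4]; simp
  -- the four pops
  have hp1 : PySem.List.pop? myDeck = some (d1, rest.reverse ++ [p2, p1, d2]) := by
    rw [hdeck]
    have : rest.reverse ++ [p2, p1, d2, d1] = (rest.reverse ++ [p2, p1, d2]) ++ [d1] := by simp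
    rw [this, PySem.List.pop?_last]
  have hp2 : PySem.List.pop? (rest.reverse ++ [p2, p1, d2]) = some (d2, rest.reverse ++ [p2, p1]) := by
    have : rest.reverse ++ [p2, p1, d2] = (rest.reverse ++ [p2, p1]) ++ [d2] := by simp
    rw [this, PySem.List.pop?_last]
  have hp3 : PySem.List.pop? (rest.reverse ++ [p2, p1]) = some (p1, rest.reverse ++ [p2]) := by
    have : rest.reverse ++ [p2, p1] = (rest.reverse ++ [p2]) ++ [p1] := by simp
    rw [this, PySem.List.pop?_last]
  have hp4 : PySem.List.pop? (rest.reverse ++ [p2]) = some (p2, rest.reverse) := PySem.List.pop?_last _ _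
  rw [hp1]; dsimp only
  rw [hp2]; dsimp only
  rw [hp3]; dsimp only
  rw [hp4]; dsimp only
  -- B's precomputed data
  have hds : myDeck.reverse.take 2 ++ myDeck.reverse.drop 4 = [d1, d2] ++ rest := by
    rw [hrev, hrev1, hrev2, hrev3]; rfl
  have hpl : (myDeck.reverse.drop 2).take 2 = [p1, p2] := by
    rw [hrev, hrev1, hrev2, hrev3]; rfl
  simp only [hds, hpl]
  -- B's first two scan steps consume d1 and d2
  have hg0 : ([d1, d2] ++ rest)[0]? = some d1 := rfl
  have hg1 : ([d1, d2] ++ rest)[1]? = some d2 := rfl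
  cases hs1 : cardStep? (0, 0) d1 with
  | none =>
    rw [dealLoopA_bad [d1, d2] rest.reverse (by simp only [pointCount, pointCountGo, hs1]),
      stopIndex?_bad _ (0, 0) 0 d1 (Or.inl (by omega)) hg0 hs1]
  | some s1 =>
    rw [stopIndex?_step _ (0, 0) 0 d1 s1 (Or.inl (by omega)) hg0 hs1]
    cases hs2 : cardStep? s1 d2 with
    | none =>
      rw [dealLoopA_bad [d1, d2] rest.reverse (by simp only [pointCount, pointCountGo, hs1, hs2]),
        stopIndex?_bad _ s1 1 d2 (Or.inl (by omega)) hg1 hs2]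
    | some st2 =>
      rw [stopIndex?_step _ s1 1 d2 st2 (Or.inl (by omega)) hg1 hs2]
      have hfold : pvFold [d1, d2] (0, 0) = some st2 := by
        simp only [pvFold, hs1, hs2]
      have hmain := dealLoopA_eq_stopIndex rest.reverse.length rest.reverse (le_refl _)
        [d1, d2] st2 (by simp) hfold
      rw [List.reverse_reverse] at hmain
      have hl2 : ([d1, d2] : List String).length = 2 := rfl
      rw [hl2] at hmain
      rw [hmain]
      cases stopIndex? ([d1, d2] ++ rest) st2 2 with
      | none => rfl
      | some k => rfl
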